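-- pv_equiv track=rewrite | github.com/OlaszPL/Introduction_to_computer_science_course | Kolokwia 2/zad2_kol_popr1_2023.py | zad
-- ===== SOURCE A (Python) =====
-- def size(odc):
--     return abs(odc[0] - odc[1])
--
-- def infer_with_rest(odc, used, n, T):
--     for i in range(n):
--         if used[i] and infer(odc, T[i]):
--             return True
--
--     return False
--
-- def infer(odc1, odc2):
--     return odc1[0] <= odc2[0] <= odc1[1] or odc1[0] <= odc2[1] <= odc1[1] or odc2[0] <= odc1[0] <= odc2[1] or odc2[0] <= odc1[1] <= odc2[1]
--
-- def zad(T, k): # k  - łączna długość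
--     n = len(T)
--     used = [False for _ in range(n)] # które odcinki były użyte
--
--     def rek(T, n, k, used, i = 0):
--         if k < 0:
--             return False
--         if k == 0:
--             return True
--         if i == n:
--             return False
--
--         if not infer_with_rest(T[i], used, n, T):
--             used[i] = True
--             if rek(T, n, k - size(T[i]), used, i + 1):
--                 return True
--             used[i] = False
--
--         return rek(T, n, k, used, i + 1)
--
--     return rek(T, n, k, used)
--
-- T = [(0, 100), (250, 1000), (2000, 3172)]
-- ===== SOURCE B (Python) =====
-- def size(odc):
--     return abs(odc[0] - odc[1])
--
-- def infer(odc1, odc2):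
--     return odc1[0] <= odc2[0] <= odc1[1] or odc1[0] <= odc2[1] <= odc1[1] or odc2[0] <= odc1[0] <= odc2[1] or odc2[0] <= odc1[1] <= odc2[1]
--
-- def zad(T, k):
--     # iterative depth-first search with an explicit stack; each state carries
--     # the next index, the remaining length, and the list of chosen intervals
--     n = len(T)
--     stack = [(0, k, [])]
--     while stack:
--         i, r, chosen = stack.pop()
--         if r == 0:
--             return True
--         if r < 0 or i >= n:
--             continue
--         iv = T[i]
--         stack.append((i + 1, r, chosen))
--         if all(not infer(iv, c) for c in chosen):
--             stack.append((i + 1, r - size(iv), chosen + [iv]))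
--     return False
-- ===== Notes on version B (the rewrite author's own statement) =====
-- stated objective: alternative
-- what changed: A's recursive backtracking over a mutated used-flags array (conflict-checked by scanning all n flags) is replaced by an iterative explicit-stack depth-first search whose immutable states carry the list of chosen intervals, conflict-checked against that list only.
-- outside the precondition, e.g. on zad([(0, 5), (9,)], 5): A returns True, B returns True; on zad([(0, 5), (9,)], 4): A raises IndexError, B raises IndexError
import Mathlib
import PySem

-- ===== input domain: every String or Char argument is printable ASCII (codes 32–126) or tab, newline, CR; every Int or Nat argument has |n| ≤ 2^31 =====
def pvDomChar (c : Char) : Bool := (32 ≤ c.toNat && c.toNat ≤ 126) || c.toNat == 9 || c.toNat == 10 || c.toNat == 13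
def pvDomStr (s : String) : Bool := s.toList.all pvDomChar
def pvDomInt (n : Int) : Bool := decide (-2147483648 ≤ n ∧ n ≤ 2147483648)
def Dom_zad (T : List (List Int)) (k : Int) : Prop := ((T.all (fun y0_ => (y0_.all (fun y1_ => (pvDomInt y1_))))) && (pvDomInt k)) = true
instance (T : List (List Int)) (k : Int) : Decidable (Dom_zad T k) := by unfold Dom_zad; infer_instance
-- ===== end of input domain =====

-- B replaces A's recursive backtracking over a mutated used-flags array by an iterative
-- explicit-stack search whose states carry the chosen intervals (objective: alternative).

-- ===== PORT A =====
def sizeP (odc : List Int) : Int := |PySem.List.pyGetD odc 0 0 - PySem.List.pyGetD odc 1 0|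

def inferP (o1 o2 : List Int) : Bool :=
  decide ((PySem.List.pyGetD o1 0 0 ≤ PySem.List.pyGetD o2 0 0 ∧ PySem.List.pyGetD o2 0 0 ≤ PySem.List.pyGetD o1 1 0) ∨
          (PySem.List.pyGetD o1 0 0 ≤ PySem.List.pyGetD o2 1 0 ∧ PySem.List.pyGetD o2 1 0 ≤ PySem.List.pyGetD o1 1 0) ∨
          (PySem.List.pyGetD o2 0 0 ≤ PySem.List.pyGetD o1 0 0 ∧ PySem.List.pyGetD o1 0 0 ≤ PySem.List.pyGetD o2 1 0) ∨
          (PySem.List.pyGetD o2 0 0 ≤ PySem.List.pyGetD o1 1 0 ∧ PySem.List.pyGetD o1 1 0 ≤ PySem.List.pyGetD o2 1 0))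

def inferWithRestP (odc : List Int) (used : List Bool) (n : Nat) (T : List (List Int)) : Bool :=
  (List.range n).any (fun i => used.getD i false && inferP odc (T.getD i []))

-- rek, with fuel (the top call passes length+1, always enough to reach the i = n test)
def rekP (T : List (List Int)) (n : Nat) : Nat → Int → List Bool → Nat → Bool
  | 0, _, _, _ => false
  | fuel+1, k, used, i =>
    if k < 0 then false
    else if k = 0 then true
    else if i = n then false
    else if inferWithRestP (T.getD i []) used n T = false then
      if rekP T n fuel (k - sizeP (T.getD i [])) (used.set i true) (i+1) then true
      else rekP T n fuel k used (i+1)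
    else rekP T n fuel k used (i+1)

def zad (T : List (List Int)) (k : Int) : Bool :=
  rekP T T.length (T.length + 1) k (List.replicate T.length false) 0

-- ===== PORT B =====
-- the while loop, with fuel (the top call passes 3^len + 1, a bound on the number of
-- loop iterations: state (i, _, _) contributes at most 3^(len-i) iterations)
def loopB (T : List (List Int)) : Nat → List (Nat × Int × List (List Int)) → Bool
  | 0, _ => false
  | _, [] => false
  | fuel+1, (i, r, chosen) :: rest =>
    if r = 0 then true
    else if r < 0 ∨ T.length ≤ i then loopB T fuel rest
    else
      if chosen.all (fun c => !inferP (T.getD i []) c) then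
        loopB T fuel ((i+1, r - sizeP (T.getD i []), chosen ++ [T.getD i []]) :: (i+1, r, chosen) :: rest)
      else loopB T fuel ((i+1, r, chosen) :: rest)

def zad_alt (T : List (List Int)) (k : Int) : Bool :=
  loopB T (3 ^ T.length + 1) [(0, k, [])]

-- ===== PRECONDITION & SPEC =====
-- Pre_ excludes inputs with a row of fewer than two endpoints together with k > 0:
-- there A almost always raises IndexError (it raises as soon as its search touches
-- the short row; with k ≤ 0 no row is ever touched).
def Pre_zad (T : List (List Int)) (k : Int) : Prop := k ≤ 0 ∨ ∀ row ∈ T, 2 ≤ row.length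
instance (T : List (List Int)) (k : Int) : Decidable (Pre_zad T k) := by unfold Pre_zad; infer_instance

def pvWitness_zad : List (List Int) × Int := ([[0, 5], [10, 20]], 5)

def Spec_zad (T : List (List Int)) (k : Int) (out : Bool) : Prop := out = zad_alt T k
instance (T : List (List Int)) (k : Int) (out : Bool) : Decidable (Spec_zad T k out) := by unfold Spec_zad; infer_instance

-- ===== CLAIM (what is proved, stated in full; the proofs are below) =====
def Claim_equal_zad : Prop := ∀ (T : List (List Int)) (k : Int), Dom_zad T k → Pre_zad T k → Spec_zad T k (zad T k)

-- ===== LEMMAS AND PROOFS =====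

-- selection semantics shared by both ports: a sublist of the remaining rows,
-- each compatible with every earlier-chosen row, with sizes summing to r
def sumS (S : List (List Int)) : Int := (S.map sizeP).sum

def GoodSel : List (List Int) → List (List Int) → Prop
  | _, [] => True
  | C, x :: S => (∀ c ∈ C, inferP x c = false) ∧ GoodSel (C ++ [x]) S

def SemP (T C : List (List Int)) (i : Nat) (r : Int) : Prop :=
  ∃ S, S.Sublist (T.drop i) ∧ GoodSel C S ∧ sumS S = r

lemma sumS_nonneg (S : List (List Int)) : 0 ≤ sumS S := by
  apply List.sum_nonneg
  intro x hx
  rcases List.mem_map.mp hx with ⟨o, _, rfl⟩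
  exact abs_nonneg _

lemma sem_zero (T C : List (List Int)) (i : Nat) : SemP T C i 0 :=
  ⟨[], List.nil_sublist _, trivial, rfl⟩

lemma not_sem_neg {T C : List (List Int)} {i : Nat} {r : Int} (h : r < 0) : ¬ SemP T C i r := by
  rintro ⟨S, -, -, rfl⟩
  exact absurd (sumS_nonneg S) (by omega)

lemma not_sem_end {T C : List (List Int)} {i : Nat} {r : Int} (hi : T.length ≤ i) (hr : r ≠ 0) :
    ¬ SemP T C i r := by
  rintro ⟨S, hs, -, rfl⟩
  rw [List.drop_eq_nil_of_le hi] at hs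
  rw [List.sublist_nil.mp hs] at hr
  exact hr rfl

lemma sem_step {T C : List (List Int)} {i : Nat} {r : Int} (h : i < T.length) :
    SemP T C i r ↔
      ((∀ c ∈ C, inferP (T.getD i []) c = false) ∧
        SemP T (C ++ [T.getD i []]) (i+1) (r - sizeP (T.getD i []))) ∨ SemP T C (i+1) r := by
  have hd : T.drop i = T.getD i [] :: T.drop (i+1) := by
    rw [List.getD_eq_getElem T [] h]
    exact List.drop_eq_getElem_cons h
  constructor
  · rintro ⟨S, hs, hg, rfl⟩
    rw [hd] at hs
    rcases List.sublist_cons_iff.mp hs with hs' | ⟨S', rfl, hs'⟩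
    · exact Or.inr ⟨S, hs', hg, rfl⟩
    · rcases hg with ⟨hc, hg'⟩
      refine Or.inl ⟨hc, S', hs', hg', ?_⟩
      simp only [sumS, List.map_cons, List.sum_cons]
      omega
  · rintro (⟨hc, S', hs', hg', hsum⟩ | ⟨S, hs, hg, hsum⟩)
    · refine ⟨T.getD i [] :: S', ?_, ⟨hc, hg'⟩, ?_⟩
      · rw [hd]; exact hs'.cons₂ _
      · simp only [sumS, List.map_cons, List.sum_cons] at hsum ⊢
        omega
    · exact ⟨S, by rw [hd]; exact hs.cons _, hg, hsum⟩

-- characterisation of A's helper infer_with_rest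
lemma iwr_iff (x : List Int) (used : List Bool) (n : Nat) (T : List (List Int)) :
    inferWithRestP x used n T = true ↔
      ∃ j, j < n ∧ used.getD j false = true ∧ inferP x (T.getD j []) = true := by
  simp [inferWithRestP, List.any_eq_true, List.mem_range, Bool.and_eq_true]

lemma getD_set_ne (l : List Bool) (i j : Nat) (b : Bool) (h : i ≠ j) :
    (l.set i b).getD j false = l.getD j false := by
  simp [List.getD_eq_getElem?_getD, h]

lemma getD_set_self (l : List Bool) (i : Nat) (b : Bool) (h : i < l.length) :
    (l.set i b).getD i false = b := by
  simp [List.getD_eq_getElem?_getD, h]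

lemma ite_bool_or (a b : Bool) : ((if a = true then true else b) = true) ↔ (a = true ∨ b = true) := by
  cases a <;> simp

-- A's recursion computes exactly SemP (C abstracts the rows flagged in used)
lemma rek_iff (T : List (List Int)) :
    ∀ fuel (k : Int) (used : List Bool) (C : List (List Int)) (i : Nat),
      T.length - i < fuel → i ≤ T.length → used.length = T.length →
      (∀ j, i ≤ j → used.getD j false = false) →
      (∀ x, inferWithRestP x used T.length T = true ↔ ∃ c ∈ C, inferP x c = true) →
      (rekP T T.length fuel k used i = true ↔ SemP T C i k) := by
  intro fuel
  induction fuel with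
  | zero => intro k used C i hfuel; omega
  | succ fuel ih =>
    intro k used C i hfuel hi hlen hfalse hC
    by_cases hk0 : k < 0
    · simp [rekP, hk0, not_sem_neg hk0]
    by_cases hk : k = 0
    · simp [rekP, hk, sem_zero]
    by_cases hin : i = T.length
    · subst hin
      simp [rekP, hk0, hk, not_sem_end le_rfl hk]
    have hilt : i < T.length := by omega
    have hskip : rekP T T.length fuel k used (i+1) = true ↔ SemP T C (i+1) k :=
      ih k used C (i+1) (by omega) (by omega) hlen (fun j hj => hfalse j (by omega)) hC
    by_cases hcmp : inferWithRestP (T.getD i []) used T.length T = false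
    · -- compatible: A tries taking row i, then skipping it
      have husedi : used.getD i false = false := hfalse i le_rfl
      have hC' : ∀ x, inferWithRestP x (used.set i true) T.length T = true ↔
          ∃ c ∈ C ++ [T.getD i []], inferP x c = true := by
        intro x
        rw [iwr_iff]
        constructor
        · rintro ⟨j, hj, hu, hinf⟩
          by_cases hji : j = i
          · subst hji
            exact ⟨T.getD j [], by simp, hinf⟩
          · rw [getD_set_ne used i j true (Ne.symm hji)] at hu
            rcases (hC x).mp ((iwr_iff x used T.length T).mpr ⟨j, hj, hu, hinf⟩) with ⟨c, hc, hcx⟩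
            exact ⟨c, by simp [hc], hcx⟩
        · rintro ⟨c, hc, hcx⟩
          rcases List.mem_append.mp hc with hc | hc
          · rcases (iwr_iff x used T.length T).mp ((hC x).mpr ⟨c, hc, hcx⟩) with ⟨j, hj, hu, hinf⟩
            have hji : j ≠ i := fun h => by rw [h, husedi] at hu; exact absurd hu (by simp)
            refine ⟨j, hj, ?_, hinf⟩
            rw [getD_set_ne used i j true (Ne.symm hji)]
            exact hu
          · rw [List.mem_singleton.mp hc] at hcx
            refine ⟨i, hilt, ?_, hcx⟩
            rw [getD_set_self used i true (by omega)]
      have htake : rekP T T.length fuel (k - sizeP (T.getD i [])) (used.set i true) (i+1) = true ↔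
          SemP T (C ++ [T.getD i []]) (i+1) (k - sizeP (T.getD i [])) := by
        apply ih _ _ _ (i+1) (by omega) (by omega) (by simpa using hlen)
        · intro j hj
          rw [getD_set_ne used i j true (by omega)]
          exact hfalse j (by omega)
        · exact hC'
      have hall : ∀ c ∈ C, inferP (T.getD i []) c = false := by
        intro c hc
        by_contra hne
        have : inferWithRestP (T.getD i []) used T.length T = true :=
          (hC _).mpr ⟨c, hc, by simpa using hne⟩
        rw [hcmp] at this; exact absurd this (by simp)
      rw [sem_step hilt]
      simp only [rekP, if_neg hk0, if_neg hk, if_neg hin, if_pos hcmp, ite_bool_or]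
      constructor
      · rintro (hx | hx)
        · exact Or.inl ⟨hall, htake.mp hx⟩
        · exact Or.inr (hskip.mp hx)
      · rintro (⟨-, hx⟩ | hx)
        · exact Or.inl (htake.mpr hx)
        · exact Or.inr (hskip.mpr hx)
    · -- row i conflicts with a flagged row: A skips it
      have hcmp' : inferWithRestP (T.getD i []) used T.length T = true := by
        revert hcmp; cases inferWithRestP (T.getD i []) used T.length T <;> simp
      have hnot : ¬ ∀ c ∈ C, inferP (T.getD i []) c = false := by
        rcases (hC _).mp hcmp' with ⟨c, hc, hcx⟩
        intro hall
        rw [hall c hc] at hcx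
        exact absurd hcx (by simp)
      rw [sem_step hilt]
      simp only [rekP, if_neg hk0, if_neg hk, if_neg hin, if_neg hcmp]
      constructor
      · intro hx; exact Or.inr (hskip.mp hx)
      · rintro (⟨hc, -⟩ | hx)
        · exact absurd hc hnot
        · exact hskip.mpr hx

-- B's stack loop computes SemP of some state on the stack
lemma loop_iff (T : List (List Int)) :
    ∀ fuel (stack : List (Nat × Int × List (List Int))),
      (stack.map (fun st => 3 ^ (T.length - st.1))).sum < fuel →
      (loopB T fuel stack = true ↔ ∃ st ∈ stack, SemP T st.2.2 st.1 st.2.1) := by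
  intro fuel
  induction fuel with
  | zero => intro stack h; omega
  | succ fuel ih =>
    intro stack hm
    match stack with
    | [] => simp [loopB]
    | (i, r, chosen) :: rest =>
      simp only [List.map_cons, List.sum_cons] at hm
      by_cases hr : r = 0
      · subst hr
        simp only [loopB]
        exact ⟨fun _ => ⟨(i, 0, chosen), by simp, sem_zero T chosen i⟩, fun _ => rfl⟩
      by_cases h : r < 0 ∨ T.length ≤ i
      · have hrest := ih rest (by
          have hpos : 0 < 3 ^ (T.length - i) := Nat.pos_of_neZero _
          omega)
        simp only [loopB, if_neg hr, if_pos h]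
        rw [hrest]
        have hst : ¬ SemP T chosen i r := by
          rcases h with h | h
          · exact not_sem_neg h
          · exact not_sem_end h hr
        simp only [List.mem_cons]
        constructor
        · rintro ⟨st, hmem, hs⟩; exact ⟨st, Or.inr hmem, hs⟩
        · rintro ⟨st, hmem | hmem, hs⟩
          · rw [hmem] at hs; exact absurd hs hst
          · exact ⟨st, hmem, hs⟩
      have hilt : i < T.length := by rcases not_or.mp h with ⟨-, h2⟩; omega
      have hpos : 0 < 3 ^ (T.length - (i+1)) := Nat.pos_of_neZero _
      have h3 : 3 ^ (T.length - i) = 3 * 3 ^ (T.length - (i+1)) := by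
        rw [← pow_succ']; congr 1; omega
      have hstep := sem_step (C := chosen) (r := r) hilt
      by_cases hall : (chosen.all fun c => !inferP (T.getD i []) c) = true
      · have hnew := ih ((i+1, r - sizeP (T.getD i []), chosen ++ [T.getD i []]) ::
            (i+1, r, chosen) :: rest) (by
          simp only [List.map_cons, List.sum_cons]
          omega)
        simp only [loopB, if_neg hr, if_neg h, if_pos hall]
        rw [hnew]
        have hall' : ∀ c ∈ chosen, inferP (T.getD i []) c = false := by
          intro c hc
          have hcb := List.all_eq_true.mp hall c hc
          revert hcb; cases inferP (T.getD i []) c <;> simp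
        simp only [List.mem_cons]
        constructor
        · rintro ⟨st, hmem | hmem | hmem, hs⟩
          · rw [hmem] at hs
            exact ⟨(i, r, chosen), Or.inl rfl, hstep.mpr (Or.inl ⟨hall', hs⟩)⟩
          · rw [hmem] at hs
            exact ⟨(i, r, chosen), Or.inl rfl, hstep.mpr (Or.inr hs)⟩
          · exact ⟨st, Or.inr hmem, hs⟩
        · rintro ⟨st, hmem | hmem, hs⟩
          · rw [hmem] at hs
            rcases hstep.mp hs with ⟨-, hs'⟩ | hs'
            · exact ⟨(i+1, r - sizeP (T.getD i []), chosen ++ [T.getD i []]), Or.inl rfl, hs'⟩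
            · exact ⟨(i+1, r, chosen), Or.inr (Or.inl rfl), hs'⟩
          · exact ⟨st, Or.inr (Or.inr hmem), hs⟩
      · have hnew := ih ((i+1, r, chosen) :: rest) (by
          simp only [List.map_cons, List.sum_cons]
          omega)
        simp only [loopB, if_neg hr, if_neg h, if_neg hall]
        rw [hnew]
        have hnot : ¬ ∀ c ∈ chosen, inferP (T.getD i []) c = false := by
          intro hall'
          apply hall
          exact List.all_eq_true.mpr (fun c hc => by rw [hall' c hc]; rfl)
        simp only [List.mem_cons]
        constructor
        · rintro ⟨st, hmem | hmem, hs⟩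
          · rw [hmem] at hs
            exact ⟨(i, r, chosen), Or.inl rfl, hstep.mpr (Or.inr hs)⟩
          · exact ⟨st, Or.inr hmem, hs⟩
        · rintro ⟨st, hmem | hmem, hs⟩
          · rw [hmem] at hs
            rcases hstep.mp hs with ⟨hc, -⟩ | hs'
            · exact absurd hc hnot
            · exact ⟨(i+1, r, chosen), Or.inl rfl, hs'⟩
          · exact ⟨st, Or.inr hmem, hs⟩

-- ===== VERDICT (by name: the statement is the Claim_ definition above) =====
theorem zad_spec : Claim_equal_zad := by
  intro T k _ _
  unfold Spec_zad zad zad_alt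
  have hA := rek_iff T (T.length + 1) k (List.replicate T.length false) [] 0
    (by omega) (by omega) (by simp)
    (fun j _ => by simp)
    (by
      intro x
      rw [iwr_iff]
      constructor
      · rintro ⟨j, hj, hu, -⟩
        simp at hu
      · rintro ⟨c, hc, -⟩
        exact absurd hc (List.not_mem_nil))
  have hB := loop_iff T (3 ^ T.length + 1) [(0, k, [])] (by
    simp only [List.map_cons, List.map_nil, List.sum_cons, List.sum_nil, Nat.sub_zero]
    omega)
  apply Bool.coe_iff_coe.mp
  rw [hA, hB]
  constructor
  · intro hs
    exact ⟨(0, k, []), by simp, hs⟩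
  · rintro ⟨st, hm, hs⟩
    rw [List.mem_singleton.mp hm] at hs
    exact hs
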